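-- pv_equiv track=rewrite | github.com/novohit/python_homework | 函数/计算ID号.py | count
-- ===== SOURCE A (Python) =====
-- def count(n, x):
--     res = 0
--     for i in range(len(str(n))):
--         d = int(str(n)[-i - 1])
--         res += n // 10 ** (i + 1) * 10 ** i
--         if x == d:
--             res += n % 10 ** i + 1
--         if x < d:
--             res += 10 ** i
--     return res
-- ===== SOURCE B (Python) =====
-- def count(n, x):
--     def go(m, p, low):
--         m, d = divmod(m, 10)
--         res = m * p
--         if x == d:
--             res += low + 1
--         if x < d:
--             res += p
--         if m == 0:
--             return res
--         return res + go(m, p * 10, low + d * p)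
--     return go(n, 1, 0)
-- ===== Notes on version B (the rewrite author's own statement) =====
-- stated objective: alternative
-- what changed: A walks str(n) with negative indexing, re-parsing each digit with int() and recomputing 10**i and 10**(i+1) from scratch every iteration; B never builds a string: it is a divmod recursion over the digits that carries the running power and the accumulated low-order part, so each step does O(1) arithmetic on the carried state.
import Mathlib
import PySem

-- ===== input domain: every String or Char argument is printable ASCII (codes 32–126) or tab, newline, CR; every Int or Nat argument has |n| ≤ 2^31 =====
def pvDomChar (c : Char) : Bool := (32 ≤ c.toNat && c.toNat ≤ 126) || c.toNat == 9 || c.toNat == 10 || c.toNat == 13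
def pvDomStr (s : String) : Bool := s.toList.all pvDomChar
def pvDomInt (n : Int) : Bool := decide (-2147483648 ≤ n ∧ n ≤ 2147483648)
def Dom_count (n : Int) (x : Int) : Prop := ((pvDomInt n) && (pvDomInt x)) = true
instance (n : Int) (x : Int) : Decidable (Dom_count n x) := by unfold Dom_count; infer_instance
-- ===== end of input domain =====

-- B replaces A's string-of-n digit walk (negative indexing, int() per digit, powers
-- recomputed per position) with a pure-arithmetic divmod recursion carrying the running
-- power and low-order accumulator (objective: alternative).


-- ===== PORT A =====
-- literal port of A; the `.getD 0` default of `d` is never reached under Pre_count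
-- (there Python's int(str(n)[-i-1]) succeeds, so the port's option is `some`).
def count (n : Int) (x : Int) : Int :=
  (PySem.List.pyRange 0 (PySem.Str.len (PySem.Int.toStr n)) 1).foldl
    (fun res i =>
      let d : Int := ((PySem.Str.pyGet? (PySem.Int.toStr n) (-i - 1)).bind
        (fun c => PySem.Int.ofStr? (String.ofList [c]))).getD 0
      let res1 := res + PySem.Int.floordiv n (10 ^ (i + 1).toNat) * 10 ^ i.toNat
      let res2 := if x = d then res1 + PySem.Int.mod n (10 ^ i.toNat) + 1 else res1
      if x < d then res2 + 10 ^ i.toNat else res2) 0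

-- ===== PORT B =====
-- literal port of Source B's inner `go`. Python's `go` recurses without a structural bound,
-- so the port carries fuel; for 0 ≤ m the recursion depth is the digit count of m, which
-- is at most natAbs m + 1, so the fuel case 0 is never reached on inputs in Pre_count
-- (for m < 0 Python B itself dies of RecursionError — outside Pre_count, where A raises too).
def countAltGo (x : Int) (fuel : Nat) (m p low : Int) : Int :=
  match fuel with
  | 0 => 0
  | Nat.succ fuel =>
    let q := PySem.Int.floordiv m 10
    let d := PySem.Int.mod m 10
    let res := q * p
    let res := if x = d then res + (low + 1) else res
    let res := if x < d then res + p else res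
    if q = 0 then res else res + countAltGo x fuel q (p * 10) (low + d * p)

def count_alt (n : Int) (x : Int) : Int := countAltGo x (n.natAbs + 1) n 1 0

-- ===== PRECONDITION & SPEC =====
-- Pre_count excludes exactly n < 0, where A raises ValueError: str(n) then starts with
-- '-' and A's int(str(n)[-i-1]) hits the sign character on the last iteration.
def Pre_count (n : Int) (x : Int) : Prop := 0 ≤ n
instance (n : Int) (x : Int) : Decidable (Pre_count n x) := by unfold Pre_count; infer_instance

def pvWitness_count : Int × Int := (42, 2)

def Spec_count (n : Int) (x : Int) (out : Int) : Prop := out = count_alt n x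
instance (n : Int) (x : Int) (out : Int) : Decidable (Spec_count n x out) := by unfold Spec_count; infer_instance

-- ===== CLAIM (what is proved, stated in full; the proofs are below) =====
def Claim_equal_count : Prop := ∀ (n : Int) (x : Int), Dom_count n x → Pre_count n x → Spec_count n x (count n x)

-- ===== LEMMAS AND PROOFS =====

/- ## Characterising `Nat.toDigits 10` -/

theorem tdc_append (f : ℕ) : ∀ (n : ℕ) (ds : List Char),
    Nat.toDigitsCore 10 f n ds = Nat.toDigitsCore 10 f n [] ++ ds := by
  induction f with
  | zero => intro n ds; simp [Nat.toDigitsCore]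
  | succ f ih =>
    intro n ds
    simp only [Nat.toDigitsCore]
    by_cases h : n / 10 = 0
    · simp [h]
    · simp only [h, if_false]
      rw [ih (n / 10) ((n % 10).digitChar :: ds), ih (n / 10) [(n % 10).digitChar]]
      simp

theorem tdc_fuel (n : ℕ) : ∀ (f1 f2 : ℕ), n < f1 → n < f2 →
    Nat.toDigitsCore 10 f1 n [] = Nat.toDigitsCore 10 f2 n [] := by
  induction n using Nat.strong_induction_on with
  | _ n ih =>
    intro f1 f2 h1 h2
    match f1, f2 with
    | f1 + 1, f2 + 1 =>
      simp only [Nat.toDigitsCore]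
      by_cases h : n / 10 = 0
      · simp [h]
      · simp only [h, if_false]
        rw [tdc_append, tdc_append f2]
        have hlt : n / 10 < n := Nat.div_lt_self (by omega) (by omega)
        rw [ih (n / 10) hlt f1 f2 (by omega) (by omega)]

theorem toDigits_step (n : ℕ) :
    Nat.toDigits 10 n = if n < 10 then [n.digitChar]
      else Nat.toDigits 10 (n / 10) ++ [(n % 10).digitChar] := by
  by_cases h : n < 10
  · unfold Nat.toDigits
    simp only [Nat.toDigitsCore]
    have h0 : n / 10 = 0 := by omega
    simp [h, h0, Nat.mod_eq_of_lt h]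
  · simp only [h, if_false]
    conv_lhs => unfold Nat.toDigits
    simp only [Nat.toDigitsCore]
    have h0 : ¬ n / 10 = 0 := by omega
    simp only [h0, if_false]
    rw [tdc_append, Nat.toDigits,
      tdc_fuel (n / 10) n (n / 10 + 1) (by omega) (by omega)]

theorem tdlen (m : ℕ) : (Nat.toDigits 10 m).length = Nat.log 10 m + 1 := by
  induction m using Nat.strong_induction_on with
  | _ m ih =>
    rw [toDigits_step]
    by_cases h : m < 10
    · have hl : Nat.log 10 m = 0 := Nat.log_eq_zero_iff.mpr (Or.inl h)
      simp [h, hl]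
    · have hd : m / 10 < m := Nat.div_lt_self (by omega) (by omega)
      have hl : Nat.log 10 (m / 10) = Nat.log 10 m - 1 := Nat.log_div_base 10 m
      have hpos : 0 < Nat.log 10 m := Nat.log_pos (by omega) (by omega)
      simp [h, ih (m / 10) hd]
      omega

theorem map_range_succ_shift {α : Type} (f : ℕ → α) (n : ℕ) :
    List.map f (List.range (n + 1)) = f 0 :: List.map (fun i => f (i + 1)) (List.range n) := by
  rw [List.range_succ_eq_map, List.map_cons, List.map_map]
  rfl

theorem toDigits_rev (m : ℕ) :
    (Nat.toDigits 10 m).reverse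
      = (List.range (Nat.log 10 m + 1)).map (fun i => (m / 10 ^ i % 10).digitChar) := by
  induction m using Nat.strong_induction_on with
  | _ m ih =>
    by_cases h : m < 10
    · have hl : Nat.log 10 m = 0 := Nat.log_eq_zero_iff.mpr (Or.inl h)
      rw [toDigits_step, if_pos h, hl]
      simp [Nat.mod_eq_of_lt h]
    · have hd : m / 10 < m := Nat.div_lt_self (by omega) (by omega)
      have hl : Nat.log 10 m = Nat.log 10 (m / 10) + 1 := by
        have := Nat.log_div_base 10 m
        have := Nat.log_pos (b := 10) (n := m) (by omega) (by omega)
        omega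
      rw [toDigits_step, if_neg h, List.reverse_append, hl, ih (m / 10) hd,
        map_range_succ_shift (fun i => (m / 10 ^ i % 10).digitChar) (Nat.log 10 (m / 10) + 1)]
      simp only [List.reverse_singleton, List.singleton_append, pow_zero, Nat.div_one]
      congr 1
      apply List.map_congr_left
      intro i _
      rw [pow_succ', ← Nat.div_div_eq_div_mul]

theorem ofStr_digit (v : ℕ) (hv : v < 10) :
    PySem.Int.ofStr? (String.ofList [v.digitChar]) = some (v : Int) := by
  interval_cases v <;> decide

theorem toChars_nat (m : ℕ) : (PySem.Int.toStr (m : Int)).toList = Nat.toDigits 10 m := by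
  rw [PySem.Int.toList_toStr]
  unfold PySem.Int.toChars
  simp

/- ## The common per-position sum both ports compute -/

def posTerm (x : ℤ) (m : ℕ) (p low : ℤ) (i : ℕ) : ℤ :=
  ((m / 10 ^ (i + 1) : ℕ) : ℤ) * (p * 10 ^ i)
    + (if x = ((m / 10 ^ i % 10 : ℕ) : ℤ) then low + ((m % 10 ^ i : ℕ) : ℤ) * p + 1 else 0)
    + (if x < ((m / 10 ^ i % 10 : ℕ) : ℤ) then p * 10 ^ i else 0)

theorem foldl_body_sum (L : ℕ) (body : ℤ → ℕ → ℤ) (F : ℕ → ℤ)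
    (h : ∀ res j, j < L → body res j = res + F j) :
    (List.range L).foldl body 0 = ((List.range L).map F).sum := by
  induction L with
  | zero => simp
  | succ L ih =>
    rw [List.range_succ, List.foldl_append, List.map_append, List.sum_append,
      ih (fun res j hj => h res j (by omega))]
    simp [h _ L (by omega)]

/- ## Port A computes the per-position sum -/

theorem countA_eq_sum (m : ℕ) (x : ℤ) :
    count (m : Int) x
      = ((List.range (Nat.toDigits 10 m).length).map (posTerm x m 1 0)).sum := by
  have hs : (PySem.Int.toStr (m : Int)).toList = Nat.toDigits 10 m := toChars_nat m
  have hL : PySem.Str.len (PySem.Int.toStr (m : Int))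
      = ((Nat.toDigits 10 m).length : ℤ) := by rw [PySem.Str.len_eq, hs]
  rw [count, hL, PySem.List.pyRange_zero_natCast, List.foldl_map]
  apply foldl_body_sum
  intro res j hj
  have hidx : (-(j : ℤ) - 1) = -(((j + 1 : ℕ) : ℤ)) := by push_cast; ring
  have hget : PySem.Str.pyGet? (PySem.Int.toStr (m : Int)) (-(j : ℤ) - 1)
      = some ((m / 10 ^ j % 10).digitChar) := by
    rw [PySem.Str.pyGet?_eq, PySem.Chars.pyGet?_eq_listPyGet?, hs, hidx,
      PySem.List.pyGet?_neg_natCast _ (j + 1) (by omega) (by omega)]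
    have hrev : (Nat.toDigits 10 m).reverse
        = (List.range (Nat.toDigits 10 m).length).map
            (fun i => (m / 10 ^ i % 10).digitChar) := by rw [toDigits_rev, tdlen]
    have h1 : (Nat.toDigits 10 m)[(Nat.toDigits 10 m).length - (j + 1)]?
        = (Nat.toDigits 10 m).reverse[j]? := by
      rw [List.getElem?_reverse (by omega)]
      congr 1
      omega
    rw [h1, hrev, List.getElem?_map, List.getElem?_range hj]
    rfl
  have hd : ((PySem.Str.pyGet? (PySem.Int.toStr (m : Int)) (-(j : ℤ) - 1)).bind
      (fun c => PySem.Int.ofStr? (String.ofList [c]))).getD 0 = ((m / 10 ^ j % 10 : ℕ) : ℤ) := by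
    rw [hget]
    simp only [Option.bind_some]
    rw [ofStr_digit _ (Nat.mod_lt _ (by omega))]
    rfl
  simp only [hd]
  have ht1 : ((j : ℤ) + 1).toNat = j + 1 := by omega
  have ht2 : ((j : ℤ)).toNat = j := by omega
  rw [ht1, ht2,
    show ((10 : ℤ) ^ (j + 1)) = ((10 ^ (j + 1) : ℕ) : ℤ) by push_cast; ring,
    show ((10 : ℤ) ^ j) = ((10 ^ j : ℕ) : ℤ) by push_cast; ring,
    PySem.Int.floordiv_natCast, PySem.Int.mod_natCast]
  unfold posTerm
  split_ifs <;> push_cast <;> ring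

/- ## Port B computes the same per-position sum -/

theorem go_eq (x : ℤ) : ∀ (fuel m : ℕ), m < fuel → ∀ (p low : ℤ),
    countAltGo x fuel (m : Int) p low
      = ((List.range (Nat.toDigits 10 m).length).map (posTerm x m p low)).sum := by
  intro fuel
  induction fuel with
  | zero => intro m hm; omega
  | succ fuel ih =>
    intro m hm p low
    have hq : PySem.Int.floordiv (m : Int) 10 = ((m / 10 : ℕ) : ℤ) := by
      exact_mod_cast PySem.Int.floordiv_natCast m 10
    have hdm : PySem.Int.mod (m : Int) 10 = ((m % 10 : ℕ) : ℤ) := by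
      exact_mod_cast PySem.Int.mod_natCast m 10
    rw [countAltGo]
    simp only [hq, hdm]
    by_cases h : m < 10
    · have h0 : m / 10 = 0 := by omega
      have h0' : ((m / 10 : ℕ) : ℤ) = 0 := by rw [h0]; rfl
      have hlen : (Nat.toDigits 10 m).length = 1 := by rw [toDigits_step, if_pos h]; rfl
      rw [hlen]
      simp only [List.range_one, List.map_cons, List.map_nil, List.sum_cons, List.sum_nil]
      rw [if_pos h0']
      unfold posTerm
      simp only [zero_add, pow_one, pow_zero, Nat.div_one, Nat.mod_one, h0, Nat.cast_zero]
      split_ifs <;> push_cast <;> ring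
    · have h0 : ¬ ((m / 10 : ℕ) : ℤ) = 0 := by
        have : 0 < m / 10 := Nat.div_pos (by omega) (by omega)
        omega
      rw [if_neg h0, ih (m / 10) (by omega) (p * 10) (low + ((m % 10 : ℕ) : ℤ) * p)]
      have hD : (Nat.toDigits 10 m).length = (Nat.toDigits 10 (m / 10)).length + 1 := by
        rw [toDigits_step m, if_neg h]
        simp
      rw [hD, map_range_succ_shift (posTerm x m p low)]
      rw [List.sum_cons]
      congr 1
      · -- head: the i = 0 term is exactly this level's contribution
        unfold posTerm
        simp only [pow_zero, Nat.div_one, Nat.mod_one, Nat.cast_zero]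
        split_ifs <;> push_cast <;> ring
      · -- tail: position i+1 of m is position i of m / 10 with shifted p and low
        apply congrArg List.sum
        apply List.map_congr_left
        intro i _
        unfold posTerm
        have e1 : m / 10 ^ (i + 1 + 1) = (m / 10) / 10 ^ (i + 1) := by
          rw [pow_succ', ← Nat.div_div_eq_div_mul]
        have e2 : m / 10 ^ (i + 1) % 10 = (m / 10) / 10 ^ i % 10 := by
          rw [pow_succ', ← Nat.div_div_eq_div_mul]
        have e3 : m % 10 ^ (i + 1) = m % 10 + 10 * (m / 10 % 10 ^ i) := by
          rw [pow_succ']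
          exact Nat.mod_mul
        rw [e1, e2, e3]
        split_ifs <;> push_cast <;> ring

/- ## Verdict proofs -/

theorem main_eq (m : ℕ) (x : ℤ) :
    count (m : Int) x = count_alt (m : Int) x := by
  rw [countA_eq_sum m x, count_alt]
  have : ((m : Int)).natAbs = m := Int.natAbs_natCast m
  rw [this, go_eq x (m + 1) m (by omega) 1 0]

-- ===== VERDICT (by name: the statement is the Claim_ definition above) =====
theorem count_spec : Claim_equal_count := by
  intro n x _ hpre
  show count n x = count_alt n x
  obtain ⟨m, rfl⟩ : ∃ m : ℕ, n = (m : Int) := ⟨n.toNat, (Int.toNat_of_nonneg hpre).symm⟩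
  exact main_eq m x
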